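-- pv_equiv track=rewrite | github.com/bashkirtsevich/pytile | world.py | get_4_overlap_paths
-- ===== SOURCE A (Python) =====
-- def get_4_overlap_paths(neighbour_paths):
--     """Return paths of tiles to NESW which overlap the tile in question
--     Takes a list of 4 sets of paths for the 4 points of the compass"""
--     # 1. Look up neighbours to see if this tile needs to have any of their
--     #    paths drawn on it too
--     n, e, s, w = neighbour_paths
--     # nps arranged as N, E, S, W
--     ne = [3, 4, 5]
--     se = [11, 10, 9]
--     sw = [15, 16, 17]
--     nw = [21, 22, 23]
--     outs = []
--     # Check all directions for neighbouring paths which need to be drawn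
--     for paths, tests in zip([n, e, s, w], [sw + se, nw + sw, ne + nw, se + ne]):
--         paths_out = []
--         for path in paths:
--             for test in tests:
--                 if test in path:
--                     paths_out = paths
--         outs.append(paths_out)
--     return outs
-- ===== SOURCE B (Python) =====
-- def get_4_overlap_paths(neighbour_paths):
--     """Return paths of tiles to NESW which overlap the tile in question"""
--     n, e, s, w = neighbour_paths
--     ne = [3, 4, 5]
--     se = [11, 10, 9]
--     sw = [15, 16, 17]
--     nw = [21, 22, 23]
--     zones = [sw + se, nw + sw, ne + nw, se + ne]
--     # Inverted index: corner value -> set of direction indices it is relevant to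
--     index = {}
--     for i, zone in enumerate(zones):
--         for v in zone:
--             index.setdefault(v, set()).add(i)
--     # One pass over all path elements, collecting the set of hit directions
--     hits = set()
--     for i, paths in enumerate((n, e, s, w)):
--         for path in paths:
--             for v in path:
--                 if i in index.get(v, ()):
--                     hits.add(i)
--     return [paths if i in hits else [] for i, paths in enumerate((n, e, s, w))]
-- ===== Notes on version B (the rewrite author's own statement) =====
-- stated objective: alternative
-- what changed: B inverts the data flow: it pre-builds an inverted index mapping each corner value to the set of direction indices it is relevant to, makes ONE pass over all path elements collecting the set of hit directions, and finally emits paths-or-[] per direction from that hit set; A instead runs a per-direction triple nested loop re-scanning a test list for every path.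
import Mathlib
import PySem

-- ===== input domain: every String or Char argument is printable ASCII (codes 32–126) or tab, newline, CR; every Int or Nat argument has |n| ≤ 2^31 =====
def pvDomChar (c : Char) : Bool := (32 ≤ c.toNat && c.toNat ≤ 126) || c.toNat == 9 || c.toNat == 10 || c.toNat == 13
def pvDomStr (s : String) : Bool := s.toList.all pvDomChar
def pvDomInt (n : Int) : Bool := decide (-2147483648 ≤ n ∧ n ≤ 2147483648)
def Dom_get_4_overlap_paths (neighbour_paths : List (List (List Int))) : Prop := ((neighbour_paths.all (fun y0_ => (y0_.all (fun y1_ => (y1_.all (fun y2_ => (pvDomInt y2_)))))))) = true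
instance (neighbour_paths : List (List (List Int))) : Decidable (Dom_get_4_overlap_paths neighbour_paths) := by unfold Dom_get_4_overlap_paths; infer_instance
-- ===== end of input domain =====

-- B replaces A's per-direction triple nested scan by an inverted index (corner value -> relevant
-- direction indices) plus one pass over all path elements collecting the set of hit directions
-- (objective: alternative).

-- ===== PORT A =====
-- inner two loops: 'for path in paths: for test in tests: if test in path: paths_out = paths'
def pvADir (paths : List (List Int)) (tests : List Int) : List (List Int) :=
  paths.foldl (fun st path => tests.foldl (fun st2 t => if path.contains t then paths else st2) st) []

def get_4_overlap_paths (neighbour_paths : List (List (List Int))) : List (List (List Int)) :=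
  match neighbour_paths with
  | [n, e, s, w] =>
    let ne := [(3:Int), 4, 5]
    let se := [(11:Int), 10, 9]
    let sw := [(15:Int), 16, 17]
    let nw := [(21:Int), 22, 23]
    -- 'for paths, tests in zip(...): outs.append(paths_out)'
    ([(n, sw ++ se), (e, nw ++ sw), (s, ne ++ nw), (w, se ++ ne)]).foldl
      (fun outs pr => outs ++ [pvADir pr.1 pr.2]) []
  | _ => []  -- unreachable under Pre_ (Python raises ValueError on unpacking)

-- ===== PORT B =====
-- 'zones = [sw+se, nw+sw, ne+nw, se+ne]' (closed: built once, independent of the input)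
def pvBZones : List (List Int) :=
  let ne := [(3:Int), 4, 5]
  let se := [(11:Int), 10, 9]
  let sw := [(15:Int), 16, 17]
  let nw := [(21:Int), 22, 23]
  [sw ++ se, nw ++ sw, ne ++ nw, se ++ ne]

-- 'index = {}; for i, zone in enumerate(zones): for v in zone: index.setdefault(v, set()).add(i)'
-- (setdefault(v, set()).add(i) mutates in place: net effect index[v] = index.get(v, set()) | {i},
--  key position unchanged for existing keys — exactly Dict.insert with the updated Set)
def pvBIndex : PySem.Dict Int (PySem.Set Int) :=
  (PySem.List.enumerate pvBZones).foldl
    (fun d pr => pr.2.foldl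
      (fun d v => d.insert v (PySem.Set.add (d.getD v PySem.Set.empty) pr.1)) d)
    PySem.Dict.empty

-- 'n, e, s, w = neighbour_paths'; 'hits = set(); for i, paths in enumerate((n, e, s, w)): for path in paths: for v in path:
--    if i in index.get(v, ()): hits.add(i)'
def pvBHits (neighbour_paths : List (List (List Int))) : PySem.Set Int :=
  (PySem.List.enumerate neighbour_paths).foldl
    (fun h pr => pr.2.foldl
      (fun h path => path.foldl
        (fun h v => if (pvBIndex.getD v PySem.Set.empty).contains pr.1 then PySem.Set.add h pr.1 else h) h) h)
    PySem.Set.empty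

-- '[paths if i in hits else [] for i, paths in enumerate(neighbour_paths)]'
-- 'n, e, s, w = neighbour_paths' ported as a length guard plus positional reads (exact: ValueError otherwise, outside Pre_)
def get_4_overlap_paths_alt (neighbour_paths : List (List (List Int))) : List (List (List Int)) :=
  if neighbour_paths.length = 4 then
    let n := neighbour_paths.getD 0 []
    let e := neighbour_paths.getD 1 []
    let s := neighbour_paths.getD 2 []
    let w := neighbour_paths.getD 3 []
    let hits := pvBHits [n, e, s, w]
    (PySem.List.enumerate [n, e, s, w]).map (fun pr => if hits.contains pr.1 then pr.2 else [])
  else []  -- unreachable under Pre_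

-- ===== PRECONDITION & SPEC =====
-- Pre_ excludes exactly the inputs where A raises: 'n, e, s, w = neighbour_paths' needs exactly 4 entries (ValueError otherwise).
def Pre_get_4_overlap_paths (neighbour_paths : List (List (List Int))) : Prop := neighbour_paths.length = 4
instance (neighbour_paths : List (List (List Int))) : Decidable (Pre_get_4_overlap_paths neighbour_paths) := by unfold Pre_get_4_overlap_paths; infer_instance
def pvWitness_get_4_overlap_paths : List (List (List Int)) := [[[3, 15]], [], [[1], [2, 21]], [[9]]]

def Spec_get_4_overlap_paths (neighbour_paths : List (List (List Int))) (out : List (List (List Int))) : Prop := out = get_4_overlap_paths_alt neighbour_paths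
instance (neighbour_paths : List (List (List Int))) (out : List (List (List Int))) : Decidable (Spec_get_4_overlap_paths neighbour_paths out) := by unfold Spec_get_4_overlap_paths; infer_instance

-- ===== CLAIM (what is proved, stated in full; the proofs are below) =====
def Claim_equal_get_4_overlap_paths : Prop := ∀ (neighbour_paths : List (List (List Int))), Dom_get_4_overlap_paths neighbour_paths → Pre_get_4_overlap_paths neighbour_paths → Spec_get_4_overlap_paths neighbour_paths (get_4_overlap_paths neighbour_paths)

-- ===== LEMMAS AND PROOFS =====

-- A's inner test loop: the state ends as 'paths' iff some test hits this path.
theorem pvADir_inner (path : List Int) (tests : List Int) (paths : List (List Int)) (st : List (List Int)) :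
    tests.foldl (fun st2 t => if path.contains t then paths else st2) st
      = if tests.any path.contains then paths else st := by
  induction tests generalizing st with
  | nil => simp
  | cons t ts ih =>
    simp only [List.foldl_cons, List.any_cons, ih]
    by_cases hc : path.contains t = true <;> by_cases ha : ts.any path.contains = true <;> simp_all

-- A's outer path loop collapses to one any-test.
theorem pvADir_eq (paths : List (List Int)) (tests : List Int) :
    pvADir paths tests = if paths.any (fun p => tests.any p.contains) then paths else [] := by
  unfold pvADir
  suffices h : ∀ (l : List (List Int)) (st : List (List Int)),
      l.foldl (fun st path => tests.foldl (fun st2 t => if path.contains t then paths else st2) st) st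
        = if l.any (fun p => tests.any p.contains) then paths else st from h paths []
  intro l
  induction l with
  | nil => simp
  | cons p ps ih =>
    intro st
    rw [List.foldl_cons, pvADir_inner, List.any_cons, ih]
    cases tests.any p.contains <;> cases ps.any (fun p => tests.any p.contains) <;> simp

-- the inverted index, evaluated to its literal items
theorem pvBIndex_eq : pvBIndex = PySem.Dict.mk
    [(15, [0, 1]), (16, [0, 1]), (17, [0, 1]), (11, [0, 3]), (10, [0, 3]), (9, [0, 3]),
     (21, [1, 2]), (22, [1, 2]), (23, [1, 2]), (3, [2, 3]), (4, [2, 3]), (5, [2, 3])] := by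
  decide

-- full case analysis of the index lookup over the key value
theorem pvLookup (i : Int) (v : Int) :
    (pvBIndex.getD v PySem.Set.empty).contains i
      = (if v = 15 ∨ v = 16 ∨ v = 17 then ([0,1] : List Int).contains i
        else if v = 11 ∨ v = 10 ∨ v = 9 then ([0,3] : List Int).contains i
        else if v = 21 ∨ v = 22 ∨ v = 23 then ([1,2] : List Int).contains i
        else if v = 3 ∨ v = 4 ∨ v = 5 then ([2,3] : List Int).contains i
        else false) := by
  by_cases h : v = 15 ∨ v = 16 ∨ v = 17 ∨ v = 11 ∨ v = 10 ∨ v = 9 ∨ v = 21 ∨ v = 22 ∨ v = 23 ∨ v = 3 ∨ v = 4 ∨ v = 5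
  · rcases h with rfl|rfl|rfl|rfl|rfl|rfl|rfl|rfl|rfl|rfl|rfl|rfl <;>
      · rw [pvBIndex_eq]; simp [PySem.Dict.getD, PySem.Dict.get?, List.find?]
  · simp only [not_or] at h
    obtain ⟨h1,h2,h3,h4,h5,h6,h7,h8,h9,h10,h11,h12⟩ := h
    have b1 : ((15:Int) == v) = false := by simp [beq_iff_eq]; omega
    have b2 : ((16:Int) == v) = false := by simp [beq_iff_eq]; omega
    have b3 : ((17:Int) == v) = false := by simp [beq_iff_eq]; omega
    have b4 : ((11:Int) == v) = false := by simp [beq_iff_eq]; omega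
    have b5 : ((10:Int) == v) = false := by simp [beq_iff_eq]; omega
    have b6 : ((9:Int) == v) = false := by simp [beq_iff_eq]; omega
    have b7 : ((21:Int) == v) = false := by simp [beq_iff_eq]; omega
    have b8 : ((22:Int) == v) = false := by simp [beq_iff_eq]; omega
    have b9 : ((23:Int) == v) = false := by simp [beq_iff_eq]; omega
    have b10 : ((3:Int) == v) = false := by simp [beq_iff_eq]; omega
    have b11 : ((4:Int) == v) = false := by simp [beq_iff_eq]; omega
    have b12 : ((5:Int) == v) = false := by simp [beq_iff_eq]; omega
    rw [pvBIndex_eq]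
    simp [PySem.Dict.getD, PySem.Dict.get?, List.find?, h1,h2,h3,h4,h5,h6,h7,h8,h9,h10,h11,h12,
      b1,b2,b3,b4,b5,b6,b7,b8,b9,b10,b11,b12]

-- per direction: the index lookup is membership in that direction's test list
theorem lookup0 (v : Int) : (pvBIndex.getD v PySem.Set.empty).contains 0
    = ([15, 16, 17, 11, 10, 9] : List Int).contains v := by
  rw [pvLookup]; split_ifs <;> (simp_all; try omega)

theorem lookup1 (v : Int) : (pvBIndex.getD v PySem.Set.empty).contains 1
    = ([21, 22, 23, 15, 16, 17] : List Int).contains v := by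
  rw [pvLookup]; split_ifs <;> (simp_all; try omega)

theorem lookup2 (v : Int) : (pvBIndex.getD v PySem.Set.empty).contains 2
    = ([3, 4, 5, 21, 22, 23] : List Int).contains v := by
  rw [pvLookup]; split_ifs <;> (simp_all; try omega)

theorem lookup3 (v : Int) : (pvBIndex.getD v PySem.Set.empty).contains 3
    = ([11, 10, 9, 3, 4, 5] : List Int).contains v := by
  rw [pvLookup]; split_ifs <;> (simp_all; try omega)

-- existential symmetry: some element of p lies in tests ↔ some test lies in p
theorem pvAnySwap (p tests : List Int) :
    p.any (fun v => tests.contains v) = tests.any (fun t => p.contains t) := by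
  rw [show ∀ a b : Bool, (a = b) = (a = true ↔ b = true) from by decide]
  simp only [List.any_eq_true, List.contains_iff_mem]
  exact ⟨fun ⟨v, hv, ht⟩ => ⟨v, ht, hv⟩, fun ⟨v, hv, ht⟩ => ⟨v, ht, hv⟩⟩

-- adding the same element twice is adding it once
theorem pvAddAdd (h : PySem.Set Int) (i : Int) : (PySem.Set.add h i).add i = PySem.Set.add h i :=
  PySem.Set.add_of_mem (by simp [PySem.Set.mem_add])

-- B's innermost loop over one path: conditionally add i once
theorem pvBHits_path (i : Int) (path : List Int) (h : PySem.Set Int) :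
    path.foldl (fun h v => if (pvBIndex.getD v PySem.Set.empty).contains i then PySem.Set.add h i else h) h
      = if path.any (fun v => (pvBIndex.getD v PySem.Set.empty).contains i) then PySem.Set.add h i else h := by
  induction path generalizing h with
  | nil => simp
  | cons v vs ih =>
    rw [List.foldl_cons, List.any_cons]
    cases hc : (pvBIndex.getD v PySem.Set.empty).contains i
    · simp only [Bool.false_or, Bool.false_eq_true, if_false]
      exact ih h
    · simp only [Bool.true_or, if_true]
      rw [ih]
      cases hv : vs.any (fun v => (pvBIndex.getD v PySem.Set.empty).contains i)
      · simp
      · simp [pvAddAdd]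

-- B's loop over one direction's paths: conditionally add i once
theorem pvBHits_group (i : Int) (paths : List (List Int)) (h : PySem.Set Int) :
    paths.foldl (fun h path => path.foldl
        (fun h v => if (pvBIndex.getD v PySem.Set.empty).contains i then PySem.Set.add h i else h) h) h
      = if paths.any (fun p => p.any (fun v => (pvBIndex.getD v PySem.Set.empty).contains i)) then PySem.Set.add h i else h := by
  induction paths generalizing h with
  | nil => simp
  | cons p ps ih =>
    rw [List.foldl_cons, List.any_cons, pvBHits_path]
    cases hc : p.any (fun v => (pvBIndex.getD v PySem.Set.empty).contains i)
    · simp only [Bool.false_or, Bool.false_eq_true, if_false]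
      exact ih h
    · simp only [Bool.true_or, if_true]
      rw [ih]
      cases hv : ps.any (fun p => p.any (fun v => (pvBIndex.getD v PySem.Set.empty).contains i))
      · simp
      · simp [pvAddAdd]

-- ===== VERDICT (by name: the statement is the Claim_ definition above) =====
theorem get_4_overlap_paths_spec : Claim_equal_get_4_overlap_paths := by
  intro np _ hpre
  unfold Spec_get_4_overlap_paths
  match np, hpre with
  | [n, e, s, w], _ =>
    unfold get_4_overlap_paths get_4_overlap_paths_alt pvBHits
    simp only [List.length_cons, List.length_nil, List.getD, List.getElem?_cons_zero,
      List.getElem?_cons_succ, Option.getD_some, if_true, reduceIte]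
    simp only [PySem.List.enumerate_cons, PySem.List.enumerate_nil, List.foldl_cons,
      List.foldl_nil, List.map_cons, List.map_nil, List.nil_append, List.cons_append,
      pvADir_eq]
    norm_num only [pvBHits_group]
    simp only [lookup0, lookup1, lookup2, lookup3, pvAnySwap]
    generalize (n.any fun p => ([15, 16, 17, 11, 10, 9] : List Int).any p.contains) = b0
    generalize (e.any fun p => ([21, 22, 23, 15, 16, 17] : List Int).any p.contains) = b1
    generalize (s.any fun p => ([3, 4, 5, 21, 22, 23] : List Int).any p.contains) = b2
    generalize (w.any fun p => ([11, 10, 9, 3, 4, 5] : List Int).any p.contains) = b3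
    cases b0 <;> cases b1 <;> cases b2 <;> cases b3 <;> rfl
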